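-- pv_equiv track=rewrite | github.com/kyuhyongpark/boolmore | networkmutation/constraint.py | impose_necessary
-- ===== SOURCE A (Python) =====
-- def impose_necessary(regulators, rr, node):
--     """
--     Impose the necessary condition for the rule
--     """
--     assert node in regulators, "The node should be one of the regulators"
--
--     # N = number of regulators
--     N = len(regulators)
--     # n = nth regulator
--     n = regulators.index(node)
--
--     bi = list(rr)
--     for i in range(2**N):
--         if i % 2**(N-n) > 2**(N-1-n)-1:
--             bi[i] = '0'
--
--     necessary_rr = ''.join(bi)
--
--     return necessary_rr
-- ===== SOURCE B (Python) =====
-- def impose_necessary(regulators, rr, node):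
--     """
--     Impose the necessary condition for the rule
--     """
--     assert node in regulators, "The node should be one of the regulators"
--
--     N = len(regulators)
--     n = regulators.index(node)
--     assert len(rr) >= 2 ** N, "rr should hold a truth-table entry for each of the 2**N input states"
--
--     # block-and-halve traversal: the rule splits into 2**n blocks of size
--     # 2**(N-n); in each block the first half is kept, the second half zeroed.
--     block = 2 ** (N - n)
--     half = block // 2
--     blocks = []
--     for t in range(2 ** n):
--         start = t * block
--         blocks.append(rr[start:start + half] + '0' * half)
--     blocks.append(rr[2 ** N:])
--     return ''.join(blocks)
-- ===== Notes on version B (the rewrite author's own statement) =====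
-- stated objective: alternative
-- what changed: Replaces the per-index modulo test over all 2**N positions by a block-and-halve traversal: 2**n chunk slices (keep first half, append '0'*half) joined at the end, so the per-character Python loop disappears.
import Mathlib
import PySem

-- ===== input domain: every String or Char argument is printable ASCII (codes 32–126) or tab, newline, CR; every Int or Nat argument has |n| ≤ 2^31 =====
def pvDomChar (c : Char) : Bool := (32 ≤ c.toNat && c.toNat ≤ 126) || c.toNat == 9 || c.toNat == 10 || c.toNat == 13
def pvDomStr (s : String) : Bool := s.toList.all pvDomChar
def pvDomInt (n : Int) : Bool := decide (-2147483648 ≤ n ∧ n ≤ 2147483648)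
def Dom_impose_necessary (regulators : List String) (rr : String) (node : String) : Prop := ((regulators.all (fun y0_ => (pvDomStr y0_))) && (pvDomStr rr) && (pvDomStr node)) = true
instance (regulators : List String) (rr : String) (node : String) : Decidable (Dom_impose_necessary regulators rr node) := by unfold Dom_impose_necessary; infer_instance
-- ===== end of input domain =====

-- B replaces A's per-index modulo loop over all 2^N positions by a block-and-halve
-- traversal (2^n chunk slices, each 'keep first half, zero second half', joined at the end).

-- ===== PORT A =====
-- Literal port of A at the List Char level ('bi = list(rr)', ''.join at the end).
-- 'bi[i] = "0"' is List.set; Python raises IndexError when i >= len(bi), excluded by Pre_.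
def impose_necessary (regulators : List String) (rr : String) (node : String) : String :=
  let N := regulators.length
  let n := (PySem.List.index? regulators node).getD 0
  let bi := rr.toList
  let bi := (List.range (2 ^ N)).foldl
    (fun bi i => if i % 2 ^ (N - n) > 2 ^ (N - 1 - n) - 1 then bi.set i '0' else bi) bi
  String.ofList bi

-- ===== PORT B =====
-- Literal port of Source B at the List Char level: each chunk rr[start:start+half] + '0'*half
-- is a List Char, and ''.join(blocks) is flatten (exact for an empty separator).
def impose_necessary_alt (regulators : List String) (rr : String) (node : String) : String :=
  let N := regulators.length
  let n := (PySem.List.index? regulators node).getD 0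
  let block := 2 ^ (N - n)
  let half := block / 2
  let blocks := (List.range (2 ^ n)).foldl
    (fun acc t =>
      acc ++ [PySem.List.slice rr.toList (some ((t * block : Nat) : Int))
                (some ((t * block + half : Nat) : Int)) ++ List.replicate half '0']) []
  let blocks := blocks ++ [PySem.List.slice rr.toList (some ((2 ^ N : Nat) : Int)) none]
  String.ofList blocks.flatten

-- ===== PRECONDITION & SPEC =====
-- Exactly the inputs on which Python A returns: the assert needs node ∈ regulators, and the
-- loop writes bi[2^N - 1] (an IndexError unless rr has at least 2^N characters).
def Pre_impose_necessary (regulators : List String) (rr : String) (node : String) : Prop :=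
  node ∈ regulators ∧ 2 ^ regulators.length ≤ rr.toList.length
instance (regulators : List String) (rr : String) (node : String) : Decidable (Pre_impose_necessary regulators rr node) := by unfold Pre_impose_necessary; infer_instance

def pvWitness_impose_necessary : List String × String × String := (["a", "b"], "1100", "b")

def Spec_impose_necessary (regulators : List String) (rr : String) (node : String) (out : String) : Prop := out = impose_necessary_alt regulators rr node
instance (regulators : List String) (rr : String) (node : String) (out : String) : Decidable (Spec_impose_necessary regulators rr node out) := by unfold Spec_impose_necessary; infer_instance

-- ===== CLAIM (what is proved, stated in full; the proofs are below) =====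
def Claim_equal_impose_necessary : Prop := ∀ (regulators : List String) (rr : String) (node : String), Dom_impose_necessary regulators rr node → Pre_impose_necessary regulators rr node → Spec_impose_necessary regulators rr node (impose_necessary regulators rr node)

-- ===== LEMMAS AND PROOFS =====

-- Setting cnt consecutive positions s, s+1, ..., s+cnt-1 of M to '0'.
theorem pv_setConsec (cnt : Nat) : ∀ (s : Nat) (M : List Char), s + cnt ≤ M.length →
    (List.range cnt).foldl (fun bi t => bi.set (s + t) '0') M
      = M.take s ++ List.replicate cnt '0' ++ M.drop (s + cnt) := by
  induction cnt with
  | zero => intro s M h; simp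
  | succ c ih =>
      intro s M h
      rw [List.range_succ, List.foldl_append, ih s M (by omega)]
      simp only [List.foldl_cons, List.foldl_nil]
      have hs : (M.take s).length = s := by simp; omega
      have hlen : s + c < M.length := by omega
      rw [List.append_assoc, List.set_append_right _ _ (by rw [hs]; omega), hs]
      have e1 : s + c - s = c := by omega
      rw [e1, List.set_append_right _ _ (by simp), List.length_replicate]
      have e2 : c - c = 0 := by omega
      rw [e2, List.drop_eq_getElem_cons hlen, List.set_cons_zero]
      have e3 : s + (c + 1) = s + c + 1 := by omega
      rw [e3, List.replicate_succ' (n := c)]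
      simp

-- One chunk of the blockwise view of A's loop.
def pvChunk (L : List Char) (b h t : Nat) : List Char :=
  (L.drop (t * b)).take h ++ List.replicate h '0'

theorem pv_flatten_len (L : List Char) (b h : Nat) (hb : b = h + h) :
    ∀ k : Nat, k * b ≤ L.length →
      (((List.range k).map (pvChunk L b h)).flatten).length = k * b := by
  intro k
  induction k with
  | zero => intro _; simp
  | succ m ih =>
      intro hk
      rw [List.range_succ, List.map_append, List.flatten_append]
      have hmb : m * b ≤ L.length := by
        have : m * b ≤ (m + 1) * b := by nlinarith
        omega
      have htk : (List.take h (List.drop (m * b) L)).length = h := by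
        simp
        have : m * b + b ≤ L.length := by nlinarith [Nat.succ_mul m b]
        omega
      simp [pvChunk, ih hmb, htk]
      nlinarith [Nat.succ_mul m b]

-- A's index loop, taken b indices at a time, builds the chunks and leaves the tail.
theorem pv_main (L : List Char) (b h : Nat) (hb : b = h + h) (hh : 1 ≤ h) :
    ∀ k : Nat, k * b ≤ L.length →
      (List.range (k * b)).foldl
          (fun bi i => if i % b > h - 1 then bi.set i '0' else bi) L
        = ((List.range k).map (pvChunk L b h)).flatten ++ L.drop (k * b) := by
  intro k
  induction k with
  | zero => intro _; simp
  | succ m ih =>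
      intro hk
      have hkb : (m + 1) * b = m * b + b := by ring
      have hmb : m * b + b ≤ L.length := by omega
      rw [hkb, List.range_add, List.foldl_append, ih (by omega)]
      set S := ((List.range m).map (pvChunk L b h)).flatten ++ L.drop (m * b) with hS
      have hClen : (((List.range m).map (pvChunk L b h)).flatten).length = m * b :=
        pv_flatten_len L b h hb m (by omega)
      have hSlen : S.length = L.length := by
        rw [hS]; simp [hClen]; omega
      -- the inner fold over the m-th block: the modulo strips the block offset
      have step1 : (List.map (fun i => m * b + i) (List.range b)).foldl
            (fun bi i => if i % b > h - 1 then bi.set i '0' else bi) S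
          = (List.range b).foldl
            (fun bi i => if i > h - 1 then bi.set (m * b + i) '0' else bi) S := by
        rw [List.foldl_map]
        apply PySem.List.foldl_congr_mem
        intro acc i hi
        have hib : i < b := List.mem_range.mp hi
        have hmod : (m * b + i) % b = i := by
          rw [Nat.add_comm, Nat.add_mul_mod_self_right, Nat.mod_eq_of_lt hib]
        rw [hmod]
      have hrange : List.range b = List.range h ++ (List.range h).map (fun x => h + x) := by
        rw [hb]; exact List.range_add
      rw [step1, hrange, List.foldl_append]
      -- first half of the block: the condition is false, nothing happens
      have step2 : (List.range h).foldl
            (fun bi i => if i > h - 1 then bi.set (m * b + i) '0' else bi) S = S := by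
        rw [PySem.List.foldl_congr_mem (g := fun bi _ => bi)]
        · exact PySem.List.foldl_ignore _ _
        · intro acc i hi
          have : i < h := List.mem_range.mp hi
          rw [if_neg (by omega)]
      rw [step2]
      -- second half of the block: consecutive sets starting at m*b + h
      have step3 : (List.map (fun i => h + i) (List.range h)).foldl
            (fun bi i => if i > h - 1 then bi.set (m * b + i) '0' else bi) S
          = (List.range h).foldl (fun bi t => bi.set (m * b + h + t) '0') S := by
        rw [List.foldl_map]
        apply PySem.List.foldl_congr_mem
        intro acc i _
        rw [if_pos (by omega)]
        congr 1
        omega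
      rw [step3, pv_setConsec h (m * b + h) S (by omega), hS,
          List.take_append, List.drop_append, hClen,
          List.take_of_length_le (hClen.le.trans (by omega)),
          List.drop_eq_nil_of_le (hClen.le.trans (by omega))]
      have e1 : m * b + h - m * b = h := by omega
      have e2 : m * b + h + h - m * b = b := by omega
      rw [e1, e2]
      simp only [List.range_succ, List.map_append, List.flatten_append, List.map_cons,
        List.map_nil, List.flatten_cons, List.flatten_nil, List.append_nil, List.nil_append,
        pvChunk, List.drop_drop, List.append_assoc]

theorem impose_necessary_eq (regulators : List String) (rr : String) (node : String)
    (hpre : Pre_impose_necessary regulators rr node) :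
    impose_necessary regulators rr node = impose_necessary_alt regulators rr node := by
  obtain ⟨hmem, hlen⟩ := hpre
  -- n is a genuine index: index? is some k with k < regulators.length
  have hsome : (PySem.List.index? regulators node).isSome :=
    (PySem.List.index?_isSome_iff regulators node).mpr hmem
  obtain ⟨k, hk⟩ := Option.isSome_iff_exists.mp hsome
  obtain ⟨hklt, -, -⟩ := PySem.List.getElem_of_index?_eq_some hk
  unfold impose_necessary impose_necessary_alt
  simp only [hk, Option.getD_some]
  set N := regulators.length with hN
  set L := rr.toList with hL
  set h : Nat := 2 ^ (N - 1 - k) with hh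
  have hkN : k < N := hklt
  have hb : (2 : Nat) ^ (N - k) = h + h := by
    rw [hh, show N - k = (N - 1 - k) + 1 by omega, pow_succ]; ring
  have hh1 : 1 ≤ h := Nat.one_le_two_pow
  have hNk : (2 : Nat) ^ k * 2 ^ (N - k) = 2 ^ N := by rw [← pow_add]; congr 1; omega
  have hmain := pv_main L (2 ^ (N - k)) h hb hh1 (2 ^ k) (by rw [hNk]; exact hlen)
  rw [hNk] at hmain
  rw [hmain]
  have hhalf : (2 : Nat) ^ (N - k) / 2 = h := by rw [hb]; omega
  rw [hhalf]
  congr 1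
  rw [PySem.List.foldl_append_singleton_eq_map, List.nil_append, List.flatten_append]
  congr 1
  · congr 1
    apply List.map_congr_left
    intro t ht
    simp only [pvChunk]
    rw [PySem.List.slice_natCast]
    have he : t * 2 ^ (N - k) + h - t * 2 ^ (N - k) = h := by omega
    rw [he]
  · simp only [List.flatten_cons, List.flatten_nil, List.append_nil]
    rw [PySem.List.slice_from_natCast]

-- ===== VERDICT (by name: the statement is the Claim_ definition above) =====
theorem impose_necessary_spec : Claim_equal_impose_necessary := by
  intro regulators rr node _ hpre
  unfold Spec_impose_necessary
  exact impose_necessary_eq regulators rr node hpre
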